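-- pv_equiv track=rewrite | github.com/AvivYaniv/Project-Euler | Solutions/87.py | get_expressible_as_sum_of_prime_square_prime_cube_prime_fourth_power
-- ===== SOURCE A (Python) =====
-- import math
--
-- TRESHOLD                    = 50000000
--
-- primes                      = set()
--
-- class PowersMemoization:
--     def __init__(self, power_lower, power_upper):
--         self.power_lower    = power_lower
--         self.power_upper    = power_upper
--         self.memoization    = {}
--     def get(self, n, power):
--         if n not in self.memoization.keys():
--             self.memoization[n] = [ n ** self.power_lower ]
--             for power_number in range(self.power_lower + 1, self.power_upper + 1):
--                 self.memoization[n].append(n * self.memoization[n][power_number-self.power_lower-1])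
--         return self.memoization[n][power-self.power_lower]
--
-- def is_prime(a):
--     if a in primes:
--         return True
--     if a <= 1:
--         return False
--     for i in range(2, a//2 + 1):
--         if 0 == (a % i):
--             return False
--     primes.add(a)
--     return True
--
-- def get_primes_up_to_treshold(threshold):
--     return [ n for n in range(threshold) if is_prime(n) ]
--
-- def get_expressible_as_sum_of_prime_square_prime_cube_prime_fourth_power(treshold=TRESHOLD):
--     expressibles        = set()
--     powers_memoization  = PowersMemoization(2, 4)
--     primes_in_range     = get_primes_up_to_treshold(int(math.sqrt(treshold))+1)
--     for x in primes_in_range: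
--         for y in primes_in_range:
--             for z in primes_in_range:
--                 n = powers_memoization.get(x, 2)  + powers_memoization.get(y, 3) + powers_memoization.get(z, 4)
--                 if n > treshold:
--                     break
--                 expressibles.add(n)
--     return expressibles
-- ===== SOURCE B (Python) =====
-- import math
--
-- def get_expressible_as_sum_of_prime_square_prime_cube_prime_fourth_power(treshold=50000000):
--     limit = math.isqrt(treshold) + 1
--     primes = []
--     for a in range(2, limit):
--         if all(a % p for p in primes if p * p <= a):
--             primes.append(a)
--     expressibles = set()
--     for x in primes:
--         x2 = x * x
--         if x2 > treshold:
--             break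
--         for y in primes:
--             s = x2 + y * y * y
--             if s > treshold:
--                 break
--             for z in primes:
--                 n = s + z * z * z * z
--                 if n > treshold:
--                     break
--                 expressibles.add(n)
--     return expressibles
-- ===== Notes on version B (the rewrite author's own statement) =====
-- stated objective: faster
-- what changed: Primes are generated by trial division by already-found primes up to sqrt(a) (instead of testing every divisor up to a/2 with a memo set), powers are computed directly with partial sums hoisted out of the inner loops (instead of a memoization dict rebuilt lookup per iteration), and the outer loops break early once the partial sum exceeds the threshold.
import Mathlib
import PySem

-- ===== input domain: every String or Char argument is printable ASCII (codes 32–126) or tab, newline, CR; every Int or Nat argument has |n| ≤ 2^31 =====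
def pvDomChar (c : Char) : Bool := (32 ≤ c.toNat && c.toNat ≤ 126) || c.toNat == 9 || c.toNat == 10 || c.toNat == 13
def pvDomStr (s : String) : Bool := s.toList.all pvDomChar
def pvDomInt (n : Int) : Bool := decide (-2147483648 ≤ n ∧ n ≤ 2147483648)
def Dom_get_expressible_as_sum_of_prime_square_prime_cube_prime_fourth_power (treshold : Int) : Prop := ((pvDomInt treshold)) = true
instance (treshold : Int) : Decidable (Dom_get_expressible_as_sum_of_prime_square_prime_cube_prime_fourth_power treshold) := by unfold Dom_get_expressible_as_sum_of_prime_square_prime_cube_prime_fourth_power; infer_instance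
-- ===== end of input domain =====

-- B replaces A's per-number trial division up to a/2 (with a memo set) by trial division by the
-- already-found primes up to sqrt(a), drops the powers-memoization dict in favour of direct power
-- computation with partial sums hoisted out of the inner loops, and breaks the outer loops early;
-- objective: faster.  int(math.sqrt(t)) is ported as Int.sqrt, exact on Dom ∧ Pre (0 ≤ t ≤ 2^31).

-- ===== PORT A =====
-- is_prime's divisor loop (`for i in range(2, a//2+1): if 0 == a % i: return False`):
def pvTrialRange (a : Int) : Bool :=
  (PySem.List.pyRange 2 (PySem.Int.floordiv a 2 + 1) 1).all (fun i => !(PySem.Int.mod a i == 0))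

-- is_prime with the module-level memo set `primes` threaded as state
def pvIsPrime (st : List Int) (a : Int) : Bool × List Int :=
  if st.contains a then (true, st)
  else if a ≤ 1 then (false, st)
  else if pvTrialRange a then (true, PySem.Set.add st a) else (false, st)

-- `[n for n in range(threshold) if is_prime(n)]` (memo set starts empty)
def pvGetPrimesLoop (ns : List Int) (st : List Int) (acc : List Int) : List Int :=
  match ns with
  | [] => acc
  | n :: rest =>
    let p := pvIsPrime st n
    pvGetPrimesLoop rest p.2 (if p.1 then acc ++ [n] else acc)

def pvGetPrimes (th : Int) : List Int := pvGetPrimesLoop (PySem.List.pyRange 0 th 1) [] []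

-- PowersMemoization(2, 4): building memoization[n] = [n**2] then appends for power_number in 3..4
def pvPowList (n : Int) : List Int :=
  (PySem.List.pyRange 3 5 1).foldl
    (fun l pn => l ++ [n * (PySem.List.pyGetD l (pn - 2 - 1) 0)]) [n ^ 2]

-- PowersMemoization.get(n, power), dict threaded as state
def pvPowGet (d : PySem.Dict Int (List Int)) (n power : Int) : Int × PySem.Dict Int (List Int) :=
  let d' := if d.contains n then d else d.insert n (pvPowList n)
  (PySem.List.pyGetD (d'.getD n []) (power - 2) 0, d')

-- innermost `for z in primes_in_range` with its break
def pvALoopZ (t x y : Int) (zs : List Int) (st : List Int × PySem.Dict Int (List Int)) :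
    List Int × PySem.Dict Int (List Int) :=
  match zs with
  | [] => st
  | z :: rest =>
    let p1 := pvPowGet st.2 x 2
    let p2 := pvPowGet p1.2 y 3
    let p3 := pvPowGet p2.2 z 4
    let n := p1.1 + p2.1 + p3.1
    if n > t then (st.1, p3.2)
    else pvALoopZ t x y rest (PySem.Set.add st.1 n, p3.2)

def get_expressible_as_sum_of_prime_square_prime_cube_prime_fourth_power (treshold : Int) : List Int :=
  let primes_in_range := pvGetPrimes (Int.sqrt treshold + 1)
  (primes_in_range.foldl
    (fun st x => primes_in_range.foldl (fun st y => pvALoopZ treshold x y primes_in_range st) st)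
    (([] : List Int), (PySem.Dict.empty : PySem.Dict Int (List Int)))).1

-- ===== PORT B =====
-- `if all(a % p for p in primes if p * p <= a): primes.append(a)`
def pvBPrimes (limit : Int) : List Int :=
  (PySem.List.pyRange 2 limit 1).foldl
    (fun primes a =>
      if (primes.filter (fun p => decide (p * p ≤ a))).all (fun p => !(PySem.Int.mod a p == 0))
      then primes ++ [a] else primes) []

def pvBLoopZ (t s : Int) (zs : List Int) (e : List Int) : List Int :=
  match zs with
  | [] => e
  | z :: rest =>
    let n := s + z * z * z * z
    if n > t then e else pvBLoopZ t s rest (PySem.Set.add e n)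

def pvBLoopY (t x2 : Int) (ys P : List Int) (e : List Int) : List Int :=
  match ys with
  | [] => e
  | y :: rest =>
    let s := x2 + y * y * y
    if s > t then e else pvBLoopY t x2 rest P (pvBLoopZ t s P e)

def pvBLoopX (t : Int) (xs P : List Int) (e : List Int) : List Int :=
  match xs with
  | [] => e
  | x :: rest =>
    let x2 := x * x
    if x2 > t then e else pvBLoopX t rest P (pvBLoopY t x2 P P e)

def get_expressible_as_sum_of_prime_square_prime_cube_prime_fourth_power_alt (treshold : Int) : List Int :=
  let primes := pvBPrimes (Int.sqrt treshold + 1)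
  pvBLoopX treshold primes primes []

-- ===== PRECONDITION & SPEC =====
-- A (and B) raise ValueError on a negative treshold (math.sqrt / math.isqrt of a negative number).
def Pre_get_expressible_as_sum_of_prime_square_prime_cube_prime_fourth_power (treshold : Int) : Prop := 0 ≤ treshold
instance (treshold : Int) : Decidable (Pre_get_expressible_as_sum_of_prime_square_prime_cube_prime_fourth_power treshold) := by unfold Pre_get_expressible_as_sum_of_prime_square_prime_cube_prime_fourth_power; infer_instance

def pvWitness_get_expressible_as_sum_of_prime_square_prime_cube_prime_fourth_power : Int := 100

def Spec_get_expressible_as_sum_of_prime_square_prime_cube_prime_fourth_power (treshold : Int) (out : List Int) : Prop := out = get_expressible_as_sum_of_prime_square_prime_cube_prime_fourth_power_alt treshold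
instance (treshold : Int) (out : List Int) : Decidable (Spec_get_expressible_as_sum_of_prime_square_prime_cube_prime_fourth_power treshold out) := by unfold Spec_get_expressible_as_sum_of_prime_square_prime_cube_prime_fourth_power; infer_instance

-- ===== CLAIM (what is proved, stated in full; the proofs are below) =====
def Claim_equal_get_expressible_as_sum_of_prime_square_prime_cube_prime_fourth_power : Prop := ∀ (treshold : Int), Dom_get_expressible_as_sum_of_prime_square_prime_cube_prime_fourth_power treshold → Pre_get_expressible_as_sum_of_prime_square_prime_cube_prime_fourth_power treshold → Spec_get_expressible_as_sum_of_prime_square_prime_cube_prime_fourth_power treshold (get_expressible_as_sum_of_prime_square_prime_cube_prime_fourth_power treshold)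

-- ===== LEMMAS AND PROOFS =====

def pvIsP (a : Int) : Bool := decide (2 ≤ a ∧ a.toNat.Prime)

-- no divisor in [2, a//2] iff no divisor in [2, a): the cofactor of a proper divisor is ≥ 2
lemma pvTrialRange_iff (a : Int) (h2 : 2 ≤ a) :
    pvTrialRange a = true ↔ a.toNat.Prime := by
  unfold pvTrialRange
  rw [List.all_eq_true]
  constructor
  · intro h
    by_contra hnp
    set m := a.toNat with hm
    have hm2 : 2 ≤ m := by omega
    have hf := Nat.minFac_dvd m
    have hfp := Nat.minFac_prime (by omega : m ≠ 1)
    have hne : m.minFac ≠ m := fun he => hnp (he ▸ hfp)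
    obtain ⟨k, hk⟩ := hf
    have hk2 : 2 ≤ k := by
      rcases Nat.lt_or_ge k 2 with hlt | hge
      · interval_cases k <;> omega
      · exact hge
    have hdle : m.minFac ≤ m / 2 := by
      have : m.minFac * 2 ≤ m := by nlinarith [hfp.two_le]
      omega
    have hmem : ((m.minFac : Int)) ∈ PySem.List.pyRange 2 (PySem.Int.floordiv a 2 + 1) 1 := by
      rw [PySem.List.mem_pyRange_one]
      have : PySem.Int.floordiv a 2 = ((m / 2 : Nat) : Int) := by
        have := PySem.Int.floordiv_natCast m 2
        rw [show ((m:Int)) = a by omega] at this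
        exact_mod_cast this
      constructor
      · exact_mod_cast hfp.two_le
      · omega
    have := h _ hmem
    simp only [Bool.not_eq_eq_eq_not, Bool.not_true, beq_eq_false_iff_ne] at this
    apply this
    rw [PySem.Int.mod_eq_zero_iff_dvd]
    have : (m.minFac : Int) ∣ (m : Int) := Int.natCast_dvd_natCast.mpr (Nat.minFac_dvd m)
    rwa [show ((m:Int)) = a by omega] at this
  · intro hp i hi
    rw [PySem.List.mem_pyRange_one] at hi
    simp only [Bool.not_eq_eq_eq_not, Bool.not_true, beq_eq_false_iff_ne]
    intro hmod
    rw [PySem.Int.mod_eq_zero_iff_dvd] at hmod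
    have hia : i ≤ PySem.Int.floordiv a 2 := by omega
    have hfd : PySem.Int.floordiv a 2 = a / 2 := PySem.Int.floordiv_eq_ediv_of_pos (by omega)
    have hilt : i < a := by omega
    have hi2 : 2 ≤ i := hi.1
    have : (i.toNat : Int) = i := Int.toNat_of_nonneg (by omega)
    have hdvd : i.toNat ∣ a.toNat := Int.natCast_dvd_natCast.mp (by
      rw [Int.toNat_of_nonneg (show (0:Int) ≤ i by omega), Int.toNat_of_nonneg (by omega)]
      exact hmod)
    have := (Nat.prime_def_lt.mp hp).2 i.toNat (by omega) hdvd
    omega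

lemma pvIsPrime_correct (st : List Int) (a : Int) (ha : 0 ≤ a)
    (hst : ∀ x ∈ st, pvIsP x = true) :
    (pvIsPrime st a).1 = pvIsP a ∧ ∀ x ∈ (pvIsPrime st a).2, pvIsP x = true := by
  unfold pvIsPrime
  by_cases hmem : st.contains a = true
  · have hx := hst a (by simpa using hmem)
    rw [if_pos hmem]
    exact ⟨hx.symm, hst⟩
  · rw [if_neg hmem]
    by_cases h1 : a ≤ 1
    · have hpa : pvIsP a = false := by simp [pvIsP]; omega
      rw [if_pos h1]
      exact ⟨hpa.symm, hst⟩
    · have h2 : 2 ≤ a := by omega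
      rw [if_neg h1]
      by_cases htr : pvTrialRange a = true
      · have hp : pvIsP a = true := by
          simp only [pvIsP, decide_eq_true_eq]
          exact ⟨h2, (pvTrialRange_iff a h2).mp htr⟩
        rw [if_pos htr]
        refine ⟨hp.symm, ?_⟩
        intro x hx
        rcases (by simpa [PySem.Set.mem_add] using hx : x ∈ st ∨ x = a) with h | h
        · exact hst x h
        · subst h; exact hp
      · have hp : pvIsP a = false := by
          simp only [pvIsP, decide_eq_false_iff_not]
          rintro ⟨-, hpr⟩
          exact htr ((pvTrialRange_iff a h2).mpr hpr)
        rw [if_neg htr]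
        exact ⟨hp.symm, hst⟩

lemma pvGetPrimesLoop_eq (ns : List Int) (st acc : List Int)
    (hns : ∀ n ∈ ns, 0 ≤ n) (hst : ∀ x ∈ st, pvIsP x = true) :
    pvGetPrimesLoop ns st acc = acc ++ ns.filter pvIsP := by
  induction ns generalizing st acc with
  | nil => simp [pvGetPrimesLoop]
  | cons n rest ih =>
    have hn : 0 ≤ n := hns n (by simp)
    have hc := pvIsPrime_correct st n hn hst
    simp only [pvGetPrimesLoop, List.filter_cons]
    rw [ih _ _ (fun m hm => hns m (by simp [hm])) hc.2, hc.1]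
    by_cases hp : pvIsP n = true <;> simp [hp]

lemma pvGetPrimes_eq (th : Int) :
    pvGetPrimes th = (PySem.List.pyRange 0 th 1).filter pvIsP := by
  unfold pvGetPrimes
  rw [pvGetPrimesLoop_eq _ _ _ (fun n hn => (PySem.List.mem_pyRange_one.mp hn).1) (by simp)]
  simp

-- B: a number ≥ 2 with no prime factor p with p*p ≤ a is prime
lemma pvBStep_iff (a : Int) (h2 : 2 ≤ a) (acc : List Int)
    (hacc : ∀ x, x ∈ acc ↔ (2 ≤ x ∧ x < a ∧ x.toNat.Prime)) :
    ((acc.filter (fun p => decide (p * p ≤ a))).all (fun p => !(PySem.Int.mod a p == 0)) = true)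
      ↔ a.toNat.Prime := by
  rw [List.all_eq_true]
  constructor
  · intro h
    by_contra hnp
    set m := a.toNat with hm
    have hm2 : 2 ≤ m := by omega
    have hfp := Nat.minFac_prime (by omega : m ≠ 1)
    have hsq : m.minFac * m.minFac ≤ m := by
      have := Nat.minFac_sq_le_self (by omega : 0 < m) (by rwa [hm] at hnp)
      nlinarith [this]
    have hlt : m.minFac < m := by nlinarith [hfp.two_le]
    have hmem : ((m.minFac : Int)) ∈ acc := by
      rw [hacc]
      refine ⟨by exact_mod_cast hfp.two_le, by omega, ?_⟩
      rwa [Int.toNat_natCast]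
    have hmemf : ((m.minFac : Int)) ∈ acc.filter (fun p => decide (p * p ≤ a)) := by
      rw [List.mem_filter]
      refine ⟨hmem, by
        simp only [decide_eq_true_eq]
        have : ((m.minFac * m.minFac : Nat) : Int) ≤ (m : Int) := by exact_mod_cast hsq
        push_cast at this
        omega⟩
    have := h _ hmemf
    simp only [Bool.not_eq_eq_eq_not, Bool.not_true, beq_eq_false_iff_ne] at this
    apply this
    rw [PySem.Int.mod_eq_zero_iff_dvd]
    have : (m.minFac : Int) ∣ (m : Int) := Int.natCast_dvd_natCast.mpr (Nat.minFac_dvd m)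
    rwa [show ((m:Int)) = a by omega] at this
  · intro hp p hpf
    rcases List.mem_filter.mp hpf with ⟨hpa, -⟩
    rcases (hacc p).mp hpa with ⟨hp2, hplt, -⟩
    simp only [Bool.not_eq_eq_eq_not, Bool.not_true, beq_eq_false_iff_ne]
    intro hmod
    rw [PySem.Int.mod_eq_zero_iff_dvd] at hmod
    have hdvd : p.toNat ∣ a.toNat := Int.natCast_dvd_natCast.mp (by
      rw [Int.toNat_of_nonneg (show (0:Int) ≤ p by omega), Int.toNat_of_nonneg (by omega)]
      exact hmod)
    have := (Nat.prime_def_lt.mp hp).2 p.toNat (by omega) hdvd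
    omega

lemma pvBPrimes_eq (limit : Int) :
    pvBPrimes limit = (PySem.List.pyRange 2 limit 1).filter pvIsP := by
  unfold pvBPrimes
  by_cases h : limit ≤ 2
  · rw [PySem.List.pyRange_one_eq_nil h]; rfl
  · have key : ∀ b : Int, 2 ≤ b → b ≤ limit →
        (PySem.List.pyRange 2 b 1).foldl
          (fun primes a =>
            if (primes.filter (fun p => decide (p * p ≤ a))).all (fun p => !(PySem.Int.mod a p == 0))
            then primes ++ [a] else primes) [] = (PySem.List.pyRange 2 b 1).filter pvIsP := by
      intro b hb
      induction b, hb using Int.le_induction with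
      | base => intro _; rw [PySem.List.pyRange_one_eq_nil (by omega)]; rfl
      | succ b hb2 ih =>
        intro hble
        rw [PySem.List.pyRange_one_succ_right (by omega), List.foldl_append, List.filter_append,
          ih (by omega), List.foldl_cons, List.foldl_nil, List.filter_cons, List.filter_nil]
        have hacc : ∀ x, x ∈ (PySem.List.pyRange 2 b 1).filter pvIsP ↔ (2 ≤ x ∧ x < b ∧ x.toNat.Prime) := by
          intro x
          rw [List.mem_filter, PySem.List.mem_pyRange_one]
          simp [pvIsP]; tauto
        have hiff := pvBStep_iff b hb2 _ hacc
        by_cases hp : b.toNat.Prime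
        · rw [if_pos (hiff.mpr hp), if_pos (by simp [pvIsP]; exact ⟨hb2, hp⟩)]
        · rw [if_neg (fun hc => hp (hiff.mp hc)), if_neg (by simp [pvIsP]; intro h; omega)]
          simp
    exact key limit (by omega) le_rfl

lemma primes_eq (th : Int) (h : 1 ≤ th) : pvGetPrimes th = pvBPrimes th := by
  rw [pvGetPrimes_eq, pvBPrimes_eq]
  by_cases h2 : 2 ≤ th
  · rw [PySem.List.pyRange_one_append 0 2 th (by omega) h2, List.filter_append]
    have : (PySem.List.pyRange 0 2 1).filter pvIsP = [] := by decide
    rw [this, List.nil_append]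
  · have hth : th = 1 := by omega
    subst hth
    decide

def pvInv (d : PySem.Dict Int (List Int)) : Prop :=
  ∀ n l, d.get? n = some l → l = pvPowList n
lemma pvPowList_eq (n : Int) : pvPowList n = [n ^ 2, n ^ 3, n ^ 4] := by
  have h : PySem.List.pyRange 3 5 1 = [3, 4] := by decide
  simp [pvPowList, h, List.foldl]
  norm_num [PySem.List.pyGetD]
  constructor <;> ring

lemma pvPowGet_correct (d : PySem.Dict Int (List Int)) (n p : Int) (hd : pvInv d) :
    (pvPowGet d n p).1 = PySem.List.pyGetD (pvPowList n) (p - 2) 0 ∧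
      pvInv (pvPowGet d n p).2 := by
  unfold pvPowGet
  by_cases h : d.contains n = true
  · simp [h]
    refine ⟨?_, hd⟩
    have h' : (d.get? n).isSome = true := by rw [← PySem.Dict.contains_eq_isSome_get?]; exact h
    rcases Option.isSome_iff_exists.mp h' with ⟨l, hl⟩
    rw [PySem.Dict.getD_eq_get?_getD, hl, Option.getD_some, hd n l hl]
  · simp only [h, Bool.false_eq_true, if_false]
    refine ⟨by rw [PySem.Dict.getD_insert_self], ?_⟩
    intro m l hml
    by_cases hmn : m = n
    · subst hmn; rw [PySem.Dict.get?_insert_self] at hml; exact (Option.some_inj.mp hml).symm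
    · rw [PySem.Dict.get?_insert_of_ne (hne := hmn)] at hml; exact hd m l hml

lemma pvPowGet2 (d : PySem.Dict Int (List Int)) (n : Int) (hd : pvInv d) :
    (pvPowGet d n 2).1 = n * n := by
  have := (pvPowGet_correct d n 2 hd).1
  rw [this, pvPowList_eq]; norm_num [PySem.List.pyGetD]; ring

lemma pvPowGet3 (d : PySem.Dict Int (List Int)) (n : Int) (hd : pvInv d) :
    (pvPowGet d n 3).1 = n * n * n := by
  have := (pvPowGet_correct d n 3 hd).1
  rw [this, pvPowList_eq]; norm_num [PySem.List.pyGetD]; ring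

lemma pvPowGet4 (d : PySem.Dict Int (List Int)) (n : Int) (hd : pvInv d) :
    (pvPowGet d n 4).1 = n * n * n * n := by
  have := (pvPowGet_correct d n 4 hd).1
  rw [this, pvPowList_eq]
  have h4 : PySem.List.pyGetD [n ^ 2, n ^ 3, n ^ 4] (4 - 2) 0 = n ^ 4 := rfl
  rw [h4]; ring

lemma pvBLoopZ_gt (t s : Int) (zs e : List Int) (h : t < s) : pvBLoopZ t s zs e = e := by
  cases zs with
  | nil => rfl
  | cons z rest =>
    have hz : 0 ≤ z * z * z * z := by nlinarith [mul_self_nonneg z, mul_self_nonneg (z*z)]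
    simp only [pvBLoopZ]
    rw [if_pos (by omega)]

lemma pvBLoopY_gt (t x2 : Int) (ys P e : List Int) (hys : ∀ y ∈ ys, 2 ≤ y) (h : t < x2) :
    pvBLoopY t x2 ys P e = e := by
  cases ys with
  | nil => rfl
  | cons y rest =>
    have hy : 2 ≤ y := hys y (by simp)
    have hy3 : 0 ≤ y * y * y := by nlinarith
    simp only [pvBLoopY]
    rw [if_pos (by omega)]

lemma pvALoopZ_eq (t x y : Int) (zs : List Int) (e : List Int) (d : PySem.Dict Int (List Int))
    (hd : pvInv d) :
    (pvALoopZ t x y zs (e, d)).1 = pvBLoopZ t (x * x + y * y * y) zs e ∧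
      pvInv (pvALoopZ t x y zs (e, d)).2 := by
  induction zs generalizing e d with
  | nil => exact ⟨rfl, hd⟩
  | cons z rest ih =>
    have h1 := pvPowGet2 d x hd
    have hd1 := (pvPowGet_correct d x 2 hd).2
    have h2 := pvPowGet3 (pvPowGet d x 2).2 y hd1
    have hd2 := (pvPowGet_correct (pvPowGet d x 2).2 y 3 hd1).2
    have h3 := pvPowGet4 (pvPowGet (pvPowGet d x 2).2 y 3).2 z hd2
    have hd3 := (pvPowGet_correct (pvPowGet (pvPowGet d x 2).2 y 3).2 z 4 hd2).2
    simp only [pvALoopZ, pvBLoopZ, h1, h2, h3]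
    by_cases hc : x * x + y * y * y + z * z * z * z > t
    · rw [if_pos hc, if_pos (by omega : x * x + y * y * y + (z * z * z * z) > t)]
      exact ⟨rfl, hd3⟩
    · rw [if_neg hc, if_neg (by omega : ¬ x * x + y * y * y + (z * z * z * z) > t)]
      exact ih _ _ hd3

lemma pvYFold_eq (t x : Int) (P : List Int) (ys : List Int) (e : List Int)
    (d : PySem.Dict Int (List Int)) (hd : pvInv d)
    (hys : ∀ y ∈ ys, 2 ≤ y) (hsort : ys.Pairwise (· < ·)) :
    (ys.foldl (fun st y => pvALoopZ t x y P st) (e, d)).1 = pvBLoopY t (x * x) ys P e ∧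
      pvInv (ys.foldl (fun st y => pvALoopZ t x y P st) (e, d)).2 := by
  induction ys generalizing e d with
  | nil => exact ⟨rfl, hd⟩
  | cons y rest ih =>
    have hy : 2 ≤ y := hys y (by simp)
    have hz := pvALoopZ_eq t x y P e d hd
    have hrest : ∀ y' ∈ rest, 2 ≤ y' := fun y' hy' => hys y' (by simp [hy'])
    have hsort' : rest.Pairwise (· < ·) := hsort.of_cons
    simp only [List.foldl_cons, pvBLoopY]
    by_cases hc : x * x + y * y * y > t
    · rw [if_pos hc]
      have hze : (pvALoopZ t x y P (e, d)).1 = e := by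
        rw [hz.1]; exact pvBLoopZ_gt _ _ _ _ hc
      have ihres := ih (pvALoopZ t x y P (e, d)).1 (pvALoopZ t x y P (e, d)).2 hz.2 hrest hsort'
      rw [Prod.mk.eta] at ihres
      rw [hze] at ihres
      refine ⟨?_, by exact ihres.2⟩
      rw [ihres.1]
      cases rest with
      | nil => rfl
      | cons y' r2 =>
        have hlt : y < y' := (List.pairwise_cons.mp hsort).1 y' (by simp)
        have h0 : (0:Int) ≤ y := by omega
        have h1 : y ≤ y' := le_of_lt hlt
        have hcube : y * y * y ≤ y' * y' * y' :=
          mul_le_mul (mul_le_mul h1 h1 h0 (by omega)) h1 h0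
            (mul_nonneg (by omega) (by omega))
        have : x * x + y' * y' * y' > t := by linarith
        simp only [pvBLoopY]
        rw [if_pos this]
    · rw [if_neg hc]
      have ihres := ih (pvALoopZ t x y P (e, d)).1 (pvALoopZ t x y P (e, d)).2 hz.2 hrest hsort'
      rw [Prod.mk.eta] at ihres
      rw [hz.1] at ihres
      exact ihres

lemma pvXFold_eq (t : Int) (P : List Int) (hP : ∀ p ∈ P, 2 ≤ p) (hPsort : P.Pairwise (· < ·))
    (xs : List Int) (e : List Int) (d : PySem.Dict Int (List Int)) (hd : pvInv d)
    (hxs : ∀ x ∈ xs, 2 ≤ x) (hsort : xs.Pairwise (· < ·)) :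
    (xs.foldl (fun st x => P.foldl (fun st y => pvALoopZ t x y P st) st) (e, d)).1 =
      pvBLoopX t xs P e := by
  induction xs generalizing e d with
  | nil => rfl
  | cons x rest ih =>
    have hx : 2 ≤ x := hxs x (by simp)
    have hy := pvYFold_eq t x P P e d hd hP hPsort
    have hrest : ∀ x' ∈ rest, 2 ≤ x' := fun x' hx' => hxs x' (by simp [hx'])
    have hsort' : rest.Pairwise (· < ·) := hsort.of_cons
    simp only [List.foldl_cons, pvBLoopX]
    by_cases hc : x * x > t
    · rw [if_pos hc]
      set res := P.foldl (fun st y => pvALoopZ t x y P st) (e, d) with hres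
      have hye : res.1 = e := by rw [hy.1]; exact pvBLoopY_gt _ _ _ _ _ hP hc
      have ihres := ih res.1 res.2 hy.2 hrest hsort'
      rw [Prod.mk.eta] at ihres
      rw [hye] at ihres
      rw [ihres]
      cases rest with
      | nil => rfl
      | cons x' r2 =>
        have hlt : x < x' := (List.pairwise_cons.mp hsort).1 x' (by simp)
        have hsq : x * x ≤ x' * x' := mul_le_mul (le_of_lt hlt) (le_of_lt hlt) (by omega) (by omega)
        have hgt : x' * x' > t := by linarith
        simp only [pvBLoopX]
        rw [if_pos hgt]
    · rw [if_neg hc]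
      set res := P.foldl (fun st y => pvALoopZ t x y P st) (e, d) with hres
      have ihres := ih res.1 res.2 hy.2 hrest hsort'
      rw [Prod.mk.eta] at ihres
      rw [hy.1] at ihres
      exact ihres

-- ===== VERDICT (by name: the statement is the Claim_ definition above) =====
theorem get_expressible_as_sum_of_prime_square_prime_cube_prime_fourth_power_spec : Claim_equal_get_expressible_as_sum_of_prime_square_prime_cube_prime_fourth_power := by
  intro t _hdom _hpre
  unfold Spec_get_expressible_as_sum_of_prime_square_prime_cube_prime_fourth_power
  unfold get_expressible_as_sum_of_prime_square_prime_cube_prime_fourth_power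
    get_expressible_as_sum_of_prime_square_prime_cube_prime_fourth_power_alt
  have hth : 1 ≤ Int.sqrt t + 1 := by have := Int.sqrt_nonneg t; omega
  rw [primes_eq _ hth]
  set P := pvBPrimes (Int.sqrt t + 1) with hP
  have hPf : P = (PySem.List.pyRange 2 (Int.sqrt t + 1) 1).filter pvIsP := pvBPrimes_eq _
  have hP2 : ∀ p ∈ P, 2 ≤ p := by
    intro p hp
    rw [hPf, List.mem_filter] at hp
    have := hp.2
    simp only [pvIsP, decide_eq_true_eq] at this
    exact this.1
  have hPsort : P.Pairwise (· < ·) := by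
    rw [hPf]
    exact (PySem.List.pairwise_lt_pyRange_one 2 (Int.sqrt t + 1)).sublist List.filter_sublist
  have hInv : pvInv (PySem.Dict.empty : PySem.Dict Int (List Int)) := by
    intro n l hl
    rw [PySem.Dict.get?_empty] at hl
    exact absurd hl (by simp)
  exact pvXFold_eq t P hP2 hPsort P [] PySem.Dict.empty hInv hP2 hPsort
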